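-- pv_equiv track=rewrite | github.com/yxd97/hbm_ubmark | utils/syscfg_utils.py | generate_slr_tags
-- ===== SOURCE A (Python) =====
-- from typing import List,Tuple
--
-- def generate_slr_tags(ntg_slrs:Tuple[int, int, int]) -> List[str]:
--     slr = []
--     ntg_slr0, ntg_slr1, ntg_slr2 = ntg_slrs
--     tgid = 0
--     for _ in range(ntg_slr0):
--         slr.append(f'slr=tg{tgid}:SLR0\n')
--         tgid += 1
--     for _ in range(ntg_slr1):
--         slr.append(f'slr=tg{tgid}:SLR1\n')
--         tgid += 1
--     for _ in range(ntg_slr2):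
--         slr.append(f'slr=tg{tgid}:SLR2\n')
--         tgid += 1
--     return slr
-- ===== SOURCE B (Python) =====
-- from typing import List, Tuple
--
-- def generate_slr_tags(ntg_slrs: Tuple[int, int, int]) -> List[str]:
--     ntg_slr0, ntg_slr1, ntg_slr2 = ntg_slrs
--     labels = ['SLR0'] * ntg_slr0 + ['SLR1'] * ntg_slr1 + ['SLR2'] * ntg_slr2
--     return [f'slr=tg{i}:{lbl}\n' for i, lbl in enumerate(labels)]
-- ===== Notes on version B (the rewrite author's own statement) =====
-- stated objective: simpler
-- what changed: Replaces the three explicit loops with a manually threaded tag counter by building a flat label list and formatting it in one enumerate comprehension.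
import Mathlib
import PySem

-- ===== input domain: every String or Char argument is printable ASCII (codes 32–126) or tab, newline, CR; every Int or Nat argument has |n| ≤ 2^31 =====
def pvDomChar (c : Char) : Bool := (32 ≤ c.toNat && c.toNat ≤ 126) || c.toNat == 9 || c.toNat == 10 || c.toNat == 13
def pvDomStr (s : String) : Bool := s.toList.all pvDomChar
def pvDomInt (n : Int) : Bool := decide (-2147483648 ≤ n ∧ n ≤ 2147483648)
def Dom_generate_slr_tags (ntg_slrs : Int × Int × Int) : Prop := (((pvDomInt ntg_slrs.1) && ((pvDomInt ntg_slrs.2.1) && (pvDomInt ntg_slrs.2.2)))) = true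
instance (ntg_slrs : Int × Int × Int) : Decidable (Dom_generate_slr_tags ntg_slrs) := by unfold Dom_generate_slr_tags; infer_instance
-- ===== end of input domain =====

-- B replaces A's three loops with a threaded tag counter by a flat label list
-- formatted in one enumerate pass (objective: simpler; same cost).

-- ===== PORT A =====
def generate_slr_tags (ntg_slrs : Int × Int × Int) : List String :=
  let ntg_slr0 := ntg_slrs.1
  let ntg_slr1 := ntg_slrs.2.1
  let ntg_slr2 := ntg_slrs.2.2
  -- slr = [] ; tgid = 0 ; three for-loops, each appending and incrementing tgid
  let st : List String × Int := ([], 0)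
  let st := (PySem.List.pyRange 0 ntg_slr0 1).foldl
    (fun (st : List String × Int) _ => (st.1 ++ ["slr=tg" ++ PySem.Int.toStr st.2 ++ ":SLR0\n"], st.2 + 1)) st
  let st := (PySem.List.pyRange 0 ntg_slr1 1).foldl
    (fun (st : List String × Int) _ => (st.1 ++ ["slr=tg" ++ PySem.Int.toStr st.2 ++ ":SLR1\n"], st.2 + 1)) st
  let st := (PySem.List.pyRange 0 ntg_slr2 1).foldl
    (fun (st : List String × Int) _ => (st.1 ++ ["slr=tg" ++ PySem.Int.toStr st.2 ++ ":SLR2\n"], st.2 + 1)) st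
  st.1

-- ===== PORT B =====
def generate_slr_tags_alt (ntg_slrs : Int × Int × Int) : List String :=
  let labels := List.replicate ntg_slrs.1.toNat "SLR0"
    ++ List.replicate ntg_slrs.2.1.toNat "SLR1"
    ++ List.replicate ntg_slrs.2.2.toNat "SLR2"
  (PySem.List.enumerate labels).map
    (fun p => "slr=tg" ++ PySem.Int.toStr p.1 ++ ":" ++ p.2 ++ "\n")

-- ===== PRECONDITION & SPEC =====
def Spec_generate_slr_tags (ntg_slrs : Int × Int × Int) (out : List String) : Prop := out = generate_slr_tags_alt ntg_slrs
instance (ntg_slrs : Int × Int × Int) (out : List String) : Decidable (Spec_generate_slr_tags ntg_slrs out) := by unfold Spec_generate_slr_tags; infer_instance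

-- ===== CLAIM (what is proved, stated in full; the proofs are below) =====
def Claim_equal_generate_slr_tags : Prop := ∀ (ntg_slrs : Int × Int × Int), Dom_generate_slr_tags ntg_slrs → Spec_generate_slr_tags ntg_slrs (generate_slr_tags ntg_slrs)

-- ===== LEMMAS AND PROOFS =====

-- One of A's loops, started at accumulator (acc, t), appends exactly the
-- formatted enumeration (from t) of `l.length` copies of its label.
theorem pv_block (l : List Int) (lbl : String) :
    ∀ (acc : List String) (t : Int),
      l.foldl (fun (st : List String × Int) _ =>
        (st.1 ++ ["slr=tg" ++ PySem.Int.toStr st.2 ++ ":" ++ lbl ++ "\n"], st.2 + 1)) (acc, t)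
      = (acc ++ (PySem.List.enumerate (List.replicate l.length lbl) t).map
          (fun p => "slr=tg" ++ PySem.Int.toStr p.1 ++ ":" ++ p.2 ++ "\n"),
         t + l.length) := by
  induction l with
  | nil => intro acc t; simp [PySem.List.enumerate_nil]
  | cons x xs ih =>
      intro acc t
      simp only [List.foldl_cons, List.length_cons, List.replicate_succ,
        PySem.List.enumerate_cons, List.map_cons, ih]
      simp only [Prod.mk.injEq]
      refine ⟨by simp, by push_cast; ring⟩

-- ===== VERDICT (by name: the statement is the Claim_ definition above) =====
theorem generate_slr_tags_spec : Claim_equal_generate_slr_tags := by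
  intro ⟨n0, n1, n2⟩ _
  show generate_slr_tags (n0, n1, n2) = generate_slr_tags_alt (n0, n1, n2)
  unfold generate_slr_tags generate_slr_tags_alt
  have hb : ∀ (lbl suf : String), suf = ":" ++ lbl ++ "\n" →
      (fun (st : List String × Int) (_ : Int) =>
        (st.1 ++ ["slr=tg" ++ PySem.Int.toStr st.2 ++ suf], st.2 + 1))
      = (fun (st : List String × Int) (_ : Int) =>
        (st.1 ++ ["slr=tg" ++ PySem.Int.toStr st.2 ++ ":" ++ lbl ++ "\n"], st.2 + 1)) := by
    intro lbl suf h; subst h; funext st _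
    simp [String.append_assoc]
  simp only [hb "SLR0" ":SLR0\n" (by decide), hb "SLR1" ":SLR1\n" (by decide), hb "SLR2" ":SLR2\n" (by decide)]
  rw [pv_block, pv_block, pv_block]
  simp [PySem.List.enumerate_append, PySem.List.length_pyRange_one]
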